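-- pv_equiv track=rewrite | github.com/Predatuh/Tracker | backend/app/routes/report_routes.py | _order_claim_scan_quad
-- ===== SOURCE A (Python) =====
-- def _order_claim_scan_quad(points):
--     ordered = [None, None, None, None]
--     sums = [point[0] + point[1] for point in points]
--     diffs = [point[1] - point[0] for point in points]
--     ordered[0] = points[sums.index(min(sums))]
--     ordered[2] = points[sums.index(max(sums))]
--     ordered[1] = points[diffs.index(min(diffs))]
--     ordered[3] = points[diffs.index(max(diffs))]
--     return ordered
-- ===== SOURCE B (Python) =====
-- def _order_claim_scan_quad(points):
--     if not points:
--         raise ValueError("min() arg is an empty sequence")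
--     p0 = points[0]
--     min_s = max_s = p0[0] + p0[1]
--     min_d = max_d = p0[1] - p0[0]
--     min_sp = max_sp = min_dp = max_dp = p0
--     for p in points[1:]:
--         s = p[0] + p[1]
--         d = p[1] - p[0]
--         if s < min_s:
--             min_s, min_sp = s, p
--         if s > max_s:
--             max_s, max_sp = s, p
--         if d < min_d:
--             min_d, min_dp = d, p
--         if d > max_d:
--             max_d, max_dp = d, p
--     return [min_sp, min_dp, max_sp, max_dp]
-- ===== Notes on version B (the rewrite author's own statement) =====
-- stated objective: alternative
-- what changed: Replaced A's two comprehension passes plus four min/max scans plus four .index scans with a single loop over the points that maintains the four running extrema (strict-improvement updates preserve first-occurrence tie-breaking).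
import Mathlib
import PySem

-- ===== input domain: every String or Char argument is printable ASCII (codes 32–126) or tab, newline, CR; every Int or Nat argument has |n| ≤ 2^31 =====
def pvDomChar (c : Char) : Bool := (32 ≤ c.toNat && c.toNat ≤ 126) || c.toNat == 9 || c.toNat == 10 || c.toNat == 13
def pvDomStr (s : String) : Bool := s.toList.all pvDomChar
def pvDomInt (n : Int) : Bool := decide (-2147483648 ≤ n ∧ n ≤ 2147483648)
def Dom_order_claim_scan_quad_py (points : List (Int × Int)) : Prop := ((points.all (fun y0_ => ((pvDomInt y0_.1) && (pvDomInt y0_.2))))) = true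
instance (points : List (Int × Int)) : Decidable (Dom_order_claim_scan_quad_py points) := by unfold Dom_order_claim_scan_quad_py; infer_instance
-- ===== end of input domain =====

-- B replaces A's eight list passes (sums/diffs comprehensions, four min/max scans and four .index scans)
-- by one pass keeping the four running extremes with strict-improvement updates (objective: alternative single-pass decomposition).
-- On the empty list A raises ValueError (min([])) and B raises ValueError too; Pre_ excludes it.

-- ===== PORT A =====
-- 'points[vals.index(v)]' chain; the 'none' branches are Python's unreachable/raising paths,
-- excluded by Pre_ (min([]) raises on the empty list; index/get cannot fail otherwise).
def pvPickA (points : List (Int × Int)) (vals : List Int) (v? : Option Int) : Int × Int :=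
  match v? with
  | none => (0, 0)
  | some v =>
    match PySem.List.index? vals v with
    | none => (0, 0)
    | some i => (PySem.List.pyGet? points (i : Int)).getD (0, 0)

def order_claim_scan_quad_py (points : List (Int × Int)) : List (Int × Int) :=
  let sums := points.map (fun point => point.1 + point.2)
  let diffs := points.map (fun point => point.2 - point.1)
  [ pvPickA points sums (PySem.List.min? sums (fun x => x)),
    pvPickA points diffs (PySem.List.min? diffs (fun x => x)),
    pvPickA points sums (PySem.List.max? sums (fun x => x)),
    pvPickA points diffs (PySem.List.max? diffs (fun x => x)) ]

-- ===== PORT B =====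
-- single pass over points[1:], state = ((min_s,min_sp),(max_s,max_sp),(min_d,min_dp),(max_d,max_dp))
def pvStepB (acc : (Int × (Int × Int)) × (Int × (Int × Int)) × (Int × (Int × Int)) × (Int × (Int × Int)))
    (p : Int × Int) : (Int × (Int × Int)) × (Int × (Int × Int)) × (Int × (Int × Int)) × (Int × (Int × Int)) :=
  let s := p.1 + p.2
  let d := p.2 - p.1
  let ms := if s < acc.1.1 then (s, p) else acc.1
  let xs := if s > acc.2.1.1 then (s, p) else acc.2.1
  let md := if d < acc.2.2.1.1 then (d, p) else acc.2.2.1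
  let xd := if d > acc.2.2.2.1 then (d, p) else acc.2.2.2
  (ms, xs, md, xd)

def order_claim_scan_quad_py_alt (points : List (Int × Int)) : List (Int × Int) :=
  match points with
  | [] => []   -- Python B raises ValueError here; excluded by Pre_
  | p0 :: rest =>
    let s0 := p0.1 + p0.2
    let d0 := p0.2 - p0.1
    let r := rest.foldl pvStepB ((s0, p0), (s0, p0), (d0, p0), (d0, p0))
    [r.1.2, r.2.2.1.2, r.2.1.2, r.2.2.2.2]

-- ===== PRECONDITION & SPEC =====
-- Pre_ excludes only the empty list, on which A raises ValueError (min of an empty sequence).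
def Pre_order_claim_scan_quad_py (points : List (Int × Int)) : Prop := points ≠ []
instance (points : List (Int × Int)) : Decidable (Pre_order_claim_scan_quad_py points) := by unfold Pre_order_claim_scan_quad_py; infer_instance
def pvWitness_order_claim_scan_quad_py : (List (Int × Int)) := [(1, 2), (3, -4)]

def Spec_order_claim_scan_quad_py (points : List (Int × Int)) (out : List (Int × Int)) : Prop := out = order_claim_scan_quad_py_alt points
instance (points : List (Int × Int)) (out : List (Int × Int)) : Decidable (Spec_order_claim_scan_quad_py points out) := by unfold Spec_order_claim_scan_quad_py; infer_instance

-- ===== CLAIM (what is proved, stated in full; the proofs are below) =====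
def Claim_equal_order_claim_scan_quad_py : Prop := ∀ (points : List (Int × Int)), Dom_order_claim_scan_quad_py points → Pre_order_claim_scan_quad_py points → Spec_order_claim_scan_quad_py points (order_claim_scan_quad_py points)

-- ===== LEMMAS AND PROOFS =====

theorem foldl_min_le_seed (x : Int) (l : List Int) : l.foldl min x ≤ x := by
  induction l generalizing x with
  | nil => simp
  | cons b l ih => exact le_trans (ih (min x b)) (min_le_left _ _)

theorem foldl_max_seed_le (x : Int) (l : List Int) : x ≤ l.foldl max x := by
  induction l generalizing x with
  | nil => simp
  | cons b l ih => exact le_trans (le_max_left _ _) (ih (max x b))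

-- A's min-selection over h::t equals B's strict-< fold with seed (f h, h)
theorem sel_min (f : (Int × Int) → Int) (h : Int × Int) (t : List (Int × Int)) :
    pvPickA (h :: t) ((h :: t).map f) (some ((t.map f).foldl min (f h)))
      = (t.foldl (fun acc p => if f p < acc.1 then (f p, p) else acc) (f h, h)).2 := by
  induction t generalizing h with
  | nil =>
    simp [pvPickA]
  | cons a t ih =>
    simp only [List.map_cons, List.foldl_cons] at ih ⊢
    by_cases hlt : f a < f h
    · have hseed : min (f h) (f a) = f a := min_eq_right (le_of_lt hlt)
      rw [hseed, if_pos hlt]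
      have hm : (t.map f).foldl min (f a) ≤ f a := foldl_min_le_seed _ _
      have hne : f h ≠ (t.map f).foldl min (f a) := by omega
      have hih := ih a
      simp only [pvPickA] at hih ⊢
      rw [PySem.List.index?_cons_of_ne _ hne]
      cases hidx : PySem.List.index? (f a :: t.map f) ((t.map f).foldl min (f a)) with
      | none => rw [hidx] at hih; simpa using hih
      | some i =>
        rw [hidx] at hih
        simp only [Option.map_some]
        simp only [PySem.List.pyGet?_natCast] at hih ⊢
        simpa using hih
    · have hseed : min (f h) (f a) = f h := min_eq_left (by omega)
      rw [hseed, if_neg hlt]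
      have hih := ih h
      simp only [pvPickA] at hih ⊢
      by_cases heq : (t.map f).foldl min (f h) = f h
      · rw [heq] at hih ⊢
        rw [PySem.List.index?_cons_self] at hih ⊢
        simp only [PySem.List.pyGet?_natCast] at hih ⊢
        simpa using hih
      · have hle : (t.map f).foldl min (f h) ≤ f h := foldl_min_le_seed _ _
        have hne1 : f h ≠ (t.map f).foldl min (f h) := fun e => heq e.symm
        have hne2 : f a ≠ (t.map f).foldl min (f h) := by
          have : (t.map f).foldl min (f h) < f h := lt_of_le_of_ne hle heq
          omega
        rw [PySem.List.index?_cons_of_ne _ hne1] at hih ⊢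
        rw [PySem.List.index?_cons_of_ne _ hne2]
        cases hidx : PySem.List.index? (t.map f) ((t.map f).foldl min (f h)) with
        | none => rw [hidx] at hih; simpa using hih
        | some i =>
          rw [hidx] at hih
          simp only [Option.map_some] at hih ⊢
          simp only [PySem.List.pyGet?_natCast] at hih ⊢
          simpa using hih

-- A's max-selection over h::t equals B's strict-> fold with seed (f h, h)
theorem sel_max (f : (Int × Int) → Int) (h : Int × Int) (t : List (Int × Int)) :
    pvPickA (h :: t) ((h :: t).map f) (some ((t.map f).foldl max (f h)))
      = (t.foldl (fun acc p => if f p > acc.1 then (f p, p) else acc) (f h, h)).2 := by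
  induction t generalizing h with
  | nil =>
    simp [pvPickA]
  | cons a t ih =>
    simp only [List.map_cons, List.foldl_cons] at ih ⊢
    by_cases hlt : f a > f h
    · have hseed : max (f h) (f a) = f a := max_eq_right (le_of_lt hlt)
      rw [hseed, if_pos hlt]
      have hm : f a ≤ (t.map f).foldl max (f a) := foldl_max_seed_le _ _
      have hne : f h ≠ (t.map f).foldl max (f a) := by omega
      have hih := ih a
      simp only [pvPickA] at hih ⊢
      rw [PySem.List.index?_cons_of_ne _ hne]
      cases hidx : PySem.List.index? (f a :: t.map f) ((t.map f).foldl max (f a)) with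
      | none => rw [hidx] at hih; simpa using hih
      | some i =>
        rw [hidx] at hih
        simp only [Option.map_some]
        simp only [PySem.List.pyGet?_natCast] at hih ⊢
        simpa using hih
    · have hseed : max (f h) (f a) = f h := max_eq_left (by omega)
      rw [hseed, if_neg hlt]
      have hih := ih h
      simp only [pvPickA] at hih ⊢
      by_cases heq : (t.map f).foldl max (f h) = f h
      · rw [heq] at hih ⊢
        rw [PySem.List.index?_cons_self] at hih ⊢
        simp only [PySem.List.pyGet?_natCast] at hih ⊢
        simpa using hih
      · have hle : f h ≤ (t.map f).foldl max (f h) := foldl_max_seed_le _ _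
        have hne1 : f h ≠ (t.map f).foldl max (f h) := fun e => heq e.symm
        have hne2 : f a ≠ (t.map f).foldl max (f h) := by
          have : f h < (t.map f).foldl max (f h) := lt_of_le_of_ne hle (fun e => heq e.symm)
          omega
        rw [PySem.List.index?_cons_of_ne _ hne1] at hih ⊢
        rw [PySem.List.index?_cons_of_ne _ hne2]
        cases hidx : PySem.List.index? (t.map f) ((t.map f).foldl max (f h)) with
        | none => rw [hidx] at hih; simpa using hih
        | some i =>
          rw [hidx] at hih
          simp only [Option.map_some] at hih ⊢
          simp only [PySem.List.pyGet?_natCast] at hih ⊢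
          simpa using hih

-- the combined four-accumulator fold is the product of the four independent folds
theorem foldl_stepB_split (t : List (Int × Int)) (a b c d : Int × (Int × Int)) :
    t.foldl pvStepB (a, b, c, d)
      = ( t.foldl (fun acc p => if p.1 + p.2 < acc.1 then (p.1 + p.2, p) else acc) a,
          t.foldl (fun acc p => if p.1 + p.2 > acc.1 then (p.1 + p.2, p) else acc) b,
          t.foldl (fun acc p => if p.2 - p.1 < acc.1 then (p.2 - p.1, p) else acc) c,
          t.foldl (fun acc p => if p.2 - p.1 > acc.1 then (p.2 - p.1, p) else acc) d ) := by
  induction t generalizing a b c d with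
  | nil => rfl
  | cons p t ih => simp only [List.foldl_cons, pvStepB, ih]

theorem order_claim_scan_quad_py_eq_alt (points : List (Int × Int))
    (hne : points ≠ []) :
    order_claim_scan_quad_py points = order_claim_scan_quad_py_alt points := by
  match points with
  | [] => exact absurd rfl hne
  | h :: t =>
    have h1 := sel_min (fun p => p.1 + p.2) h t
    have h2 := sel_min (fun p => p.2 - p.1) h t
    have h3 := sel_max (fun p => p.1 + p.2) h t
    have h4 := sel_max (fun p => p.2 - p.1) h t
    simp only [List.map_cons] at h1 h2 h3 h4
    simp [order_claim_scan_quad_py, order_claim_scan_quad_py_alt,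
      PySem.List.min?_id_cons, PySem.List.max?_id_cons, foldl_stepB_split,
      h1, h2, h3, h4]

-- ===== VERDICT (by name: the statement is the Claim_ definition above) =====
theorem order_claim_scan_quad_py_spec : Claim_equal_order_claim_scan_quad_py := by
  intro points _ hpre
  unfold Spec_order_claim_scan_quad_py
  exact order_claim_scan_quad_py_eq_alt points hpre
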